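-- pv_equiv track=rewrite | github.com/nakshatramandowara/my-assignments | MTL106/Assignment 1 MTL106/ques_1.py | calc_helper
-- ===== SOURCE A (Python) =====
-- M=1000000007
--
-- def mod_add(a, b):
--     a=(a%M +M)%M
--     b=(b%M+M)%M
--     return (a+b)%M
--
-- def mod_multiply(a, b):
--     a=(a%M+M)%M
--     b=(b%M+M)%M
--     return (a*b)%M
--
-- def calc_helper(a,b,dp):
--         if(dp[a-1][b-1]!=None):
--              return dp[a-1][b-1]
--         if(a==1):
--                 p=mod_multiply(calc_helper(a,b-1,dp)[0],a)
--                 q=mod_multiply(calc_helper(a,b-1,dp)[1],a+b-1)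
--
--         elif(b==1):
--                 p=mod_multiply(calc_helper(a-1,b,dp)[0],b)
--                 q=mod_multiply(calc_helper(a-1,b,dp)[1],a+b-1)
--         else:
--                 p=mod_add(mod_multiply(calc_helper(a-1,b,dp)[0],b),mod_multiply(calc_helper(a,b-1,dp)[0],a))
--                 q=mod_multiply(calc_helper(a-1,b,dp)[1],a+b-1)
--         dp[a-1][b-1]=(p,q)
--         return (p,q)
-- ===== SOURCE B (Python) =====
-- M=1000000007
--
-- def mod_add(a, b):
--     a=(a%M +M)%M
--     b=(b%M+M)%M
--     return (a+b)%M
--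
-- def mod_multiply(a, b):
--     a=(a%M+M)%M
--     b=(b%M+M)%M
--     return (a*b)%M
--
-- def calc_helper(a,b,dp):
--     # bottom-up iterative DP (same recurrence, no recursion); mutates dp like A
--     if dp[a-1][b-1] != None:
--         return dp[a-1][b-1]
--     for i in range(1, a+1):
--         for j in range(1, b+1):
--             if dp[i-1][j-1] != None:
--                 continue
--             if i == 1:
--                 pv, qv = dp[i-1][j-2]
--                 p = mod_multiply(pv, i)
--                 q = mod_multiply(qv, i+j-1)
--             elif j == 1:
--                 pv, qv = dp[i-2][j-1]
--                 p = mod_multiply(pv, j)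
--                 q = mod_multiply(qv, i+j-1)
--             else:
--                 p1, q1 = dp[i-2][j-1]
--                 p2, _ = dp[i-1][j-2]
--                 p = mod_add(mod_multiply(p1, j), mod_multiply(p2, i))
--                 q = mod_multiply(q1, i+j-1)
--             dp[i-1][j-1] = (p, q)
--     return dp[a-1][b-1]
-- ===== Notes on version B (the rewrite author's own statement) =====
-- stated objective: alternative
-- what changed: Top-down memoized recursion replaced by a bottom-up iterative DP that fills the table row by row with the same three-case recurrence and then reads dp[a-1][b-1]; no recursion remains.
-- outside the precondition, e.g. on calc_helper(1, 3, [[None, (1, 1), None]]): A returns (1, 3), B raises TypeError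
import Mathlib
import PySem

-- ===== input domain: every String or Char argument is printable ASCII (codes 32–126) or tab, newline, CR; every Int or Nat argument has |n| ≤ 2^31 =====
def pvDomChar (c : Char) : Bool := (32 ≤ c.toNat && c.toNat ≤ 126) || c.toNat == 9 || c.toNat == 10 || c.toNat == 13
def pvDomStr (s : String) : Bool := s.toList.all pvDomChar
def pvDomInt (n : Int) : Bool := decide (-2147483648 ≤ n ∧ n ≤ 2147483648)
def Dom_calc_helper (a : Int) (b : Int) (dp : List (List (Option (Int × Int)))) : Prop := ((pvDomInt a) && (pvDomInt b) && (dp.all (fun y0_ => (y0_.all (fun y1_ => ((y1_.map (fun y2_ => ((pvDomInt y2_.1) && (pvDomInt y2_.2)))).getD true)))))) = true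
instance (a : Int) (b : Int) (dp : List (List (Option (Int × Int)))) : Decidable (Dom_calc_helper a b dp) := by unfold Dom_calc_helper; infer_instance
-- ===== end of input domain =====

-- B replaces A's top-down memoized recursion by a bottom-up iterative DP (same recurrence).
-- Both Pythons mutate dp in place; the equivalence proved here is about the RETURN value only.

-- ===== PORT A =====
def pvM : Int := 1000000007

def pvModAdd (a b : Int) : Int :=
  let a := PySem.Int.mod (PySem.Int.mod a pvM + pvM) pvM
  let b := PySem.Int.mod (PySem.Int.mod b pvM + pvM) pvM
  PySem.Int.mod (a + b) pvM

def pvModMul (a b : Int) : Int :=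
  let a := PySem.Int.mod (PySem.Int.mod a pvM + pvM) pvM
  let b := PySem.Int.mod (PySem.Int.mod b pvM + pvM) pvM
  PySem.Int.mod (a * b) pvM

-- dp[i][j] as Python evaluates it (outer none = IndexError)
def pvCell (dp : List (List (Option (Int × Int)))) (i j : Int) : Option (Option (Int × Int)) :=
  (PySem.List.pyGet? dp i).bind (fun row => PySem.List.pyGet? row j)

-- literal port of A's recursion; fuel bounds the recursion depth, none = Python raised
def pvCalcA : Nat → Int → Int → List (List (Option (Int × Int))) → Option (Int × Int)
  | 0, _, _, _ => none
  | Nat.succ f, a, b, dp =>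
    match pvCell dp (a-1) (b-1) with
    | none => none
    | some (some v) => some v
    | some none =>
      if a = 1 then
        match pvCalcA f a (b-1) dp with
        | none => none
        | some r => some (pvModMul r.1 a, pvModMul r.2 (a+b-1))
      else if b = 1 then
        match pvCalcA f (a-1) b dp with
        | none => none
        | some r => some (pvModMul r.1 b, pvModMul r.2 (a+b-1))
      else
        match pvCalcA f (a-1) b dp, pvCalcA f a (b-1) dp with
        | some r1, some r2 =>
            some (pvModAdd (pvModMul r1.1 b) (pvModMul r2.1 a), pvModMul r1.2 (a+b-1))
        | _, _ => none

def calc_helper (a : Int) (b : Int) (dp : List (List (Option (Int × Int)))) : Int × Int :=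
  (pvCalcA (a.toNat + b.toNat + 1) a b dp).getD (0, 0)

-- ===== PORT B =====
-- dp[i][j] = v (exact for the nonnegative indices Pre_ guarantees)
def pvSetCell (dp : List (List (Option (Int × Int)))) (i j : Int) (v : Int × Int) :
    List (List (Option (Int × Int))) :=
  dp.modify i.toNat (fun row => row.set j.toNat (some v))

-- one body of B's inner loop: fill cell (i,j) (1-based) unless already filled
def pvStep (t : List (List (Option (Int × Int)))) (i j : Int) : List (List (Option (Int × Int))) :=
  match pvCell t (i-1) (j-1) with
  | some (some _) => t
  | _ =>
    let pq :=
      if i = 1 then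
        let c := ((pvCell t (i-1) (j-2)).bind id).getD (0, 0)
        (pvModMul c.1 i, pvModMul c.2 (i+j-1))
      else if j = 1 then
        let c := ((pvCell t (i-2) (j-1)).bind id).getD (0, 0)
        (pvModMul c.1 j, pvModMul c.2 (i+j-1))
      else
        let c1 := ((pvCell t (i-2) (j-1)).bind id).getD (0, 0)
        let c2 := ((pvCell t (i-1) (j-2)).bind id).getD (0, 0)
        (pvModAdd (pvModMul c1.1 j) (pvModMul c2.1 i), pvModMul c1.2 (i+j-1))
    pvSetCell t (i-1) (j-1) pq

def calc_helper_alt (a : Int) (b : Int) (dp : List (List (Option (Int × Int)))) : Int × Int :=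
  match pvCell dp (a-1) (b-1) with
  | some (some v) => v
  | _ =>
    let final := (PySem.List.pyRange 1 (a+1) 1).foldl
      (fun t i => (PySem.List.pyRange 1 (b+1) 1).foldl (fun t j => pvStep t i j) t) dp
    ((pvCell final (a-1) (b-1)).bind id).getD (0, 0)

-- ===== PRECONDITION & SPEC =====
-- Pre_ admits (i) memo-hit calls (dp[a-1][b-1] already set: A returns it at once) and
-- (ii) fresh tables: 1 ≤ a,b within bounds, dp[0][0] set, every other cell of the a×b
-- rectangle None.  Other partially-filled tables are excluded: there A's value can depend
-- on negative-index wraparound into accidentally prefilled cells, which B does not reproduce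
-- (B may raise there).
def Pre_calc_helper (a : Int) (b : Int) (dp : List (List (Option (Int × Int)))) : Prop :=
  ((pvCell dp (a-1) (b-1)).bind id).isSome = true ∨
  (1 ≤ a ∧ 1 ≤ b ∧ a ≤ (dp.length : Int) ∧
   (((dp[0]?.getD [])[0]?.getD none).isSome = true) ∧
   ∀ i < a.toNat, b ≤ ((dp[i]?.getD []).length : Int) ∧
     ∀ j < b.toNat, (i = 0 ∧ j = 0) ∨ (dp[i]?.getD [])[j]? = some none)

instance (a : Int) (b : Int) (dp : List (List (Option (Int × Int)))) : Decidable (Pre_calc_helper a b dp) := by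
  unfold Pre_calc_helper; infer_instance

def pvWitness_calc_helper : Int × Int × (List (List (Option (Int × Int)))) :=
  (2, 2, [[some (1, 1), none], [none, none]])

def Spec_calc_helper (a : Int) (b : Int) (dp : List (List (Option (Int × Int)))) (out : Int × Int) : Prop := out = calc_helper_alt a b dp
instance (a : Int) (b : Int) (dp : List (List (Option (Int × Int)))) (out : Int × Int) : Decidable (Spec_calc_helper a b dp out) := by unfold Spec_calc_helper; infer_instance

-- ===== CLAIM (what is proved, stated in full; the proofs are below) =====
def Claim_equal_calc_helper : Prop := ∀ (a : Int) (b : Int) (dp : List (List (Option (Int × Int)))), Dom_calc_helper a b dp → Pre_calc_helper a b dp → Spec_calc_helper a b dp (calc_helper a b dp)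

-- ===== LEMMAS AND PROOFS =====

-- the common value of both programs on a fresh table, as a pure recurrence (0-based)
def pvF (v0 : Int × Int) : Nat → Nat → Int × Int
  | 0, 0 => v0
  | 0, j+1 =>
      (pvModMul (pvF v0 0 j).1 1, pvModMul (pvF v0 0 j).2 ((j : Int) + 2))
  | i+1, 0 =>
      (pvModMul (pvF v0 i 0).1 1, pvModMul (pvF v0 i 0).2 ((i : Int) + 2))
  | i+1, j+1 =>
      (pvModAdd (pvModMul (pvF v0 i (j+1)).1 ((j : Int) + 2)) (pvModMul (pvF v0 (i+1) j).1 ((i : Int) + 2)),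
       pvModMul (pvF v0 i (j+1)).2 ((i : Int) + (j : Int) + 3))
  termination_by i j => (i, j)

def pvTCell (t : List (List (Option (Int × Int)))) (i j : Nat) : Option (Int × Int) :=
  (t[i]?.getD [])[j]?.getD none

theorem pvCell_eq_tcell (t : List (List (Option (Int × Int)))) (i j : Nat)
    (hi : i < t.length) (hj : j < (t[i]?.getD []).length) :
    pvCell t (i : Int) (j : Int) = some (pvTCell t i j) := by
  cases hrow : t[i]? with
  | none => rw [List.getElem?_eq_none_iff] at hrow; omega
  | some row =>
    rw [hrow] at hj
    simp only [Option.getD_some] at hj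
    cases hc : row[j]? with
    | none => rw [List.getElem?_eq_none_iff] at hc; omega
    | some c =>
      simp [pvCell, pvTCell, hrow, hc, PySem.List.pyGet?_natCast]

def pvFresh (dp : List (List (Option (Int × Int)))) (A B : Nat) : Prop :=
  A ≤ dp.length ∧
  (∀ i, i < A → B ≤ (dp[i]?.getD []).length) ∧
  (∀ i j, i < A → j < B → ¬(i = 0 ∧ j = 0) → pvTCell dp i j = none)

theorem pvCalcA_eq (dp : List (List (Option (Int × Int)))) (A B : Nat) (v0 : Int × Int)
    (hf : pvFresh dp A B) (hv0 : pvTCell dp 0 0 = some v0) :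
    ∀ fuel i j, i < A → j < B → i + j < fuel →
      pvCalcA fuel ((i : Int) + 1) ((j : Int) + 1) dp = some (pvF v0 i j) := by
  intro fuel
  induction fuel with
  | zero => intro i j _ _ h; omega
  | succ f IH =>
    intro i j hi hj hfuel
    obtain ⟨hlen, hrows, hnone⟩ := hf
    have hcell := pvCell_eq_tcell dp i j (by omega) (by have := hrows i hi; omega)
    have e1 : ((i : Int) + 1 - 1) = (i : Int) := by ring
    have e2 : ((j : Int) + 1 - 1) = (j : Int) := by ring
    match i, j with
    | 0, 0 =>
      simp only [pvCalcA, e1]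
      simp only [Nat.cast_zero] at hcell ⊢
      rw [hcell, hv0]
      simp [pvF]
    | 0, j'+1 =>
      have hc : pvTCell dp 0 (j'+1) = none := hnone 0 (j'+1) hi hj (by omega)
      rw [hc] at hcell
      simp only [pvCalcA]
      rw [e1, e2, hcell]
      rw [if_pos (by norm_num : ((0:Nat) : Int) + 1 = 1)]
      rw [show (((j'+1 : Nat)) : Int) = ((j' : Nat) : Int) + 1 from by push_cast; ring]
      rw [IH 0 j' hi (by omega) (by omega)]
      simp only [pvF, Option.some.injEq, Prod.mk.injEq]
      constructor <;> congr 1 <;> push_cast <;> ring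
    | i'+1, 0 =>
      have hc : pvTCell dp (i'+1) 0 = none := hnone (i'+1) 0 hi hj (by omega)
      rw [hc] at hcell
      simp only [pvCalcA]
      rw [e1, e2, hcell]
      rw [if_neg (by push_cast; omega : ¬ (((i'+1 : Nat)) : Int) + 1 = 1)]
      rw [if_pos (by norm_num : ((0:Nat) : Int) + 1 = 1)]
      rw [show (((i'+1 : Nat)) : Int) = ((i' : Nat) : Int) + 1 from by push_cast; ring]
      rw [IH i' 0 (by omega) hj (by omega)]
      simp only [pvF, Option.some.injEq, Prod.mk.injEq]
      constructor <;> congr 1 <;> push_cast <;> ring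
    | i'+1, j'+1 =>
      have hc : pvTCell dp (i'+1) (j'+1) = none := hnone (i'+1) (j'+1) hi hj (by omega)
      rw [hc] at hcell
      simp only [pvCalcA]
      rw [e1, e2, hcell]
      rw [if_neg (by push_cast; omega : ¬ (((i'+1 : Nat)) : Int) + 1 = 1)]
      rw [if_neg (by push_cast; omega : ¬ (((j'+1 : Nat)) : Int) + 1 = 1)]
      have H1 := IH i' (j'+1) (by omega) hj (by omega)
      have H2 := IH (i'+1) j' hi (by omega) (by omega)
      push_cast at H1 H2
      rw [show (((i'+1 : Nat)) : Int) = ((i' : Nat) : Int) + 1 from by push_cast; ring,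
          show (((j'+1 : Nat)) : Int) = ((j' : Nat) : Int) + 1 from by push_cast; ring]
      rw [H1, H2]
      simp only [pvF, Option.some.injEq, Prod.mk.injEq]
      constructor
      · congr 1 <;> congr 1 <;> push_cast <;> ring
      · congr 1 <;> push_cast <;> ring

-- processed-region predicate of the bottom-up fold: rows < k done, row k done up to m, plus the base cell
def pvProc (B k m i j : Nat) : Prop := (i < k ∧ j < B) ∨ (i = k ∧ j < m) ∨ (i = 0 ∧ j = 0)

def pvInv (dp : List (List (Option (Int × Int)))) (A B : Nat) (v0 : Int × Int)
    (k m : Nat) (t : List (List (Option (Int × Int)))) : Prop :=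
  t.length = dp.length ∧
  (∀ i : Nat, (t[i]?.getD []).length = (dp[i]?.getD []).length) ∧
  (∀ i j : Nat, i < A → j < B → pvProc B k m i j → pvTCell t i j = some (pvF v0 i j)) ∧
  (∀ i j : Nat, i < A → j < B → ¬ pvProc B k m i j → pvTCell t i j = pvTCell dp i j)

theorem pvSetCell_length (t : List (List (Option (Int × Int)))) (a b : Int) (v : Int × Int) :
    (pvSetCell t a b v).length = t.length := by
  simp [pvSetCell]

theorem pvSetCell_rowlen (t : List (List (Option (Int × Int)))) (k m : Nat) (v : Int × Int) (i : Nat) :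
    ((pvSetCell t (k : Int) (m : Int) v)[i]?.getD []).length = (t[i]?.getD []).length := by
  simp only [pvSetCell, Int.toNat_natCast, List.getElem?_modify]
  cases t[i]? with
  | none => rfl
  | some row =>
    by_cases h : k = i <;> simp [h]

theorem pvTCell_setCell (t : List (List (Option (Int × Int)))) (k m : Nat) (v : Int × Int)
    (i j : Nat) (hm : m < (t[k]?.getD []).length) :
    pvTCell (pvSetCell t (k : Int) (m : Int) v) i j =
      if i = k ∧ j = m then some v else pvTCell t i j := by
  cases hrow : t[k]? with
  | none => rw [hrow] at hm; simp at hm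
  | some row =>
    rw [hrow] at hm
    simp only [Option.getD_some] at hm
    simp only [pvTCell, pvSetCell, Int.toNat_natCast, List.getElem?_modify]
    by_cases hik : i = k
    · subst hik
      by_cases hjm : j = m
      · subst hjm
        simp [hrow, List.getElem?_set, hm]
      · simp [hrow, List.getElem?_set, hjm,
              show ¬ m = j from fun h => hjm (Eq.symm h)]
    · simp only [show ¬ k = i from fun h => hik (Eq.symm h), if_false, ite_false]
      cases t[i]? <;> simp [hik]

theorem pvInv_set (dp : List (List (Option (Int × Int)))) (A B : Nat) (v0 : Int × Int)
    (k m : Nat) (t : List (List (Option (Int × Int)))) (pq : Int × Int)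
    (hk : k < A) (hm : m < B)
    (hA : A ≤ dp.length) (hrows : ∀ i, i < A → B ≤ (dp[i]?.getD []).length)
    (ht : pvInv dp A B v0 k m t)
    (hpq : pq = pvF v0 k m) :
    pvInv dp A B v0 k (m+1) (pvSetCell t (k : Int) (m : Int) pq) := by
  obtain ⟨htl, htr, hpos, hneg⟩ := ht
  have hmt : m < (t[k]?.getD []).length := by have := hrows k hk; have := htr k; omega
  refine ⟨by rw [pvSetCell_length, htl], fun i => by rw [pvSetCell_rowlen, htr i], ?_, ?_⟩
  · intro i j hi hj hp
    rw [pvTCell_setCell t k m pq i j hmt]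
    by_cases hij : i = k ∧ j = m
    · rw [if_pos hij, hpq, hij.1, hij.2]
    · rw [if_neg hij]
      exact hpos i j hi hj (by unfold pvProc at hp ⊢; omega)
  · intro i j hi hj hnp
    rw [pvTCell_setCell t k m pq i j hmt]
    rw [if_neg (by unfold pvProc at hnp; omega)]
    exact hneg i j hi hj (by unfold pvProc at hnp ⊢; omega)

theorem pvStep_inv (dp : List (List (Option (Int × Int)))) (A B : Nat) (v0 : Int × Int)
    (k m : Nat) (t : List (List (Option (Int × Int))))
    (hf : pvFresh dp A B) (hv0 : pvTCell dp 0 0 = some v0)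
    (hk : k < A) (hm : m < B) (ht : pvInv dp A B v0 k m t) :
    pvInv dp A B v0 k (m+1) (pvStep t ((k : Int) + 1) ((m : Int) + 1)) := by
  obtain ⟨hA, hrows, hnone⟩ := hf
  obtain ⟨htl, htr, hpos, hneg⟩ := ht
  have hkt : k < t.length := by omega
  have hmt : m < (t[k]?.getD []).length := by have := hrows k hk; have := htr k; omega
  have hcell := pvCell_eq_tcell t k m hkt hmt
  unfold pvStep
  have e1 : ((k : Int) + 1 - 1) = (k : Int) := by ring
  have e2 : ((m : Int) + 1 - 1) = (m : Int) := by ring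
  rw [e1, e2, hcell]
  by_cases hbase : k = 0 ∧ m = 0
  · have hc : pvTCell t k m = some (pvF v0 k m) :=
      hpos k m hk hm (by unfold pvProc; omega)
    rw [hc]
    exact ⟨htl, htr,
      fun i j hi hj hp => hpos i j hi hj (by unfold pvProc at hp ⊢; omega),
      fun i j hi hj hnp => hneg i j hi hj (by unfold pvProc at hnp ⊢; omega)⟩
  · have hc : pvTCell t k m = none := by
      rw [hneg k m hk hm (by unfold pvProc; omega)]
      exact hnone k m hk hm hbase
    rw [hc]
    match k, m with
    | 0, 0 => exact absurd ⟨rfl, rfl⟩ hbase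
    | 0, m'+1 =>
      rw [if_pos (by norm_num : (((0:Nat) : Int) + 1) = 1)]
      rw [show ((((m'+1 : Nat)) : Int) + 1 - 2) = ((m' : Nat) : Int) from by push_cast; ring]
      have hm't : m' < (t[(0:Nat)]?.getD []).length := by
        have := hrows 0 hk; have := htr 0; omega
      rw [pvCell_eq_tcell t 0 m' (by omega) hm't]
      rw [hpos 0 m' hk (by omega) (by unfold pvProc; omega)]
      exact pvInv_set dp A B v0 0 (m'+1) t _ hk hm hA hrows ⟨htl, htr, hpos, hneg⟩
        (by simp only [pvF, Option.bind_some, id_eq, Option.getD_some, Prod.mk.injEq]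
            constructor <;> congr 1 <;> push_cast <;> ring)
    | k'+1, 0 =>
      rw [if_neg (by push_cast; omega : ¬ ((((k'+1 : Nat)) : Int) + 1) = 1)]
      rw [if_pos (by norm_num : (((0:Nat) : Int) + 1) = 1)]
      rw [show ((((k'+1 : Nat)) : Int) + 1 - 2) = ((k' : Nat) : Int) from by push_cast; ring]
      have hk't : (0:Nat) < (t[k']?.getD []).length := by
        have := hrows k' (by omega); have := htr k'; omega
      rw [pvCell_eq_tcell t k' 0 (by omega) hk't]
      rw [hpos k' 0 (by omega) hm (by unfold pvProc; omega)]
      exact pvInv_set dp A B v0 (k'+1) 0 t _ hk hm hA hrows ⟨htl, htr, hpos, hneg⟩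
        (by simp only [pvF, Option.bind_some, id_eq, Option.getD_some, Prod.mk.injEq]
            constructor <;> congr 1 <;> push_cast <;> ring)
    | k'+1, m'+1 =>
      rw [if_neg (by push_cast; omega : ¬ ((((k'+1 : Nat)) : Int) + 1) = 1)]
      rw [if_neg (by push_cast; omega : ¬ ((((m'+1 : Nat)) : Int) + 1) = 1)]
      rw [show ((((k'+1 : Nat)) : Int) + 1 - 2) = ((k' : Nat) : Int) from by push_cast; ring]
      rw [show ((((m'+1 : Nat)) : Int) + 1 - 2) = ((m' : Nat) : Int) from by push_cast; ring]
      have h1t : (m'+1 : Nat) < (t[k']?.getD []).length := by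
        have := hrows k' (by omega); have := htr k'; omega
      have h2t : m' < (t[(k'+1:Nat)]?.getD []).length := by
        have := hrows (k'+1) hk; have := htr (k'+1); omega
      rw [pvCell_eq_tcell t k' (m'+1) (by omega) h1t]
      rw [pvCell_eq_tcell t (k'+1) m' (by omega) h2t]
      rw [hpos k' (m'+1) (by omega) hm (by unfold pvProc; omega)]
      rw [hpos (k'+1) m' hk (by omega) (by unfold pvProc; omega)]
      exact pvInv_set dp A B v0 (k'+1) (m'+1) t _ hk hm hA hrows ⟨htl, htr, hpos, hneg⟩
        (by simp only [pvF, Option.bind_some, id_eq, Option.getD_some, Prod.mk.injEq]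
            constructor
            · congr 1 <;> congr 1 <;> push_cast <;> ring
            · congr 1 <;> push_cast <;> ring)

theorem pvInner (dp : List (List (Option (Int × Int)))) (A B : Nat) (v0 : Int × Int)
    (k : Nat) (t : List (List (Option (Int × Int))))
    (hf : pvFresh dp A B) (hv0 : pvTCell dp 0 0 = some v0) (hk : k < A)
    (h0 : pvInv dp A B v0 k 0 t) :
    ∀ m, m ≤ B → pvInv dp A B v0 k m
      ((PySem.List.pyRange 1 ((m : Int) + 1) 1).foldl (fun t j => pvStep t ((k : Int) + 1) j) t) := by
  intro m
  induction m with
  | zero =>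
    intro _
    rw [PySem.List.pyRange_one_eq_nil (by norm_num)]
    exact h0
  | succ m IH =>
    intro hm
    rw [show (((m+1 : Nat)) : Int) + 1 = ((m : Int) + 1) + 1 from by push_cast; ring]
    rw [PySem.List.pyRange_one_succ_right (by omega), List.foldl_append]
    simp only [List.foldl_cons, List.foldl_nil]
    exact pvStep_inv dp A B v0 k m _ hf hv0 hk (by omega) (IH (by omega))

theorem pvInv_shift (dp : List (List (Option (Int × Int)))) (A B : Nat) (v0 : Int × Int)
    (k : Nat) (t : List (List (Option (Int × Int))))
    (h : pvInv dp A B v0 k B t) : pvInv dp A B v0 (k+1) 0 t :=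
  ⟨h.1, h.2.1,
   fun i j hi hj hp => h.2.2.1 i j hi hj (by unfold pvProc at hp ⊢; omega),
   fun i j hi hj hnp => h.2.2.2 i j hi hj (by unfold pvProc at hnp ⊢; omega)⟩

theorem pvOuter (dp : List (List (Option (Int × Int)))) (A B : Nat) (v0 : Int × Int)
    (hf : pvFresh dp A B) (hv0 : pvTCell dp 0 0 = some v0) :
    ∀ k, k ≤ A → pvInv dp A B v0 k 0
      ((PySem.List.pyRange 1 ((k : Int) + 1) 1).foldl
        (fun t i => (PySem.List.pyRange 1 ((B : Int) + 1) 1).foldl (fun t j => pvStep t i j) t) dp) := by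
  intro k
  induction k with
  | zero =>
    intro _
    rw [show (PySem.List.pyRange 1 (((0:Nat):Int) + 1) 1) = [] from
          PySem.List.pyRange_one_eq_nil (by norm_num)]
    simp only [List.foldl_nil]
    refine ⟨rfl, fun i => rfl, ?_, fun i j _ _ _ => rfl⟩
    intro i j hi hj hp
    have hbase : i = 0 ∧ j = 0 := by unfold pvProc at hp; omega
    rw [hbase.1, hbase.2, hv0]
    simp [pvF]
  | succ k IH =>
    intro hk
    rw [show (((k+1 : Nat)) : Int) + 1 = ((k : Int) + 1) + 1 from by push_cast; ring]
    rw [show (PySem.List.pyRange 1 (((k : Int) + 1) + 1) 1)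
          = PySem.List.pyRange 1 ((k : Int) + 1) 1 ++ [(k : Int) + 1] from
          PySem.List.pyRange_one_succ_right (by omega),
        List.foldl_append]
    simp only [List.foldl_cons, List.foldl_nil]
    exact pvInv_shift dp A B v0 k _
      (pvInner dp A B v0 k _ hf hv0 (by omega) (IH (by omega)) B le_rfl)

theorem pv_memo (a b : Int) (dp : List (List (Option (Int × Int)))) (v : Int × Int)
    (h : pvCell dp (a-1) (b-1) = some (some v)) :
    calc_helper a b dp = v ∧ calc_helper_alt a b dp = v := by
  constructor
  · unfold calc_helper
    simp only [pvCalcA]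
    rw [h]
    rfl
  · unfold calc_helper_alt
    rw [h]

theorem calc_helper_spec : Claim_equal_calc_helper := by
  intro a b dp _ hPre
  unfold Spec_calc_helper
  by_cases hmemo : ((pvCell dp (a-1) (b-1)).bind id).isSome = true
  · obtain ⟨v, hv⟩ := Option.isSome_iff_exists.mp hmemo
    have hcell : pvCell dp (a-1) (b-1) = some (some v) := by
      cases hc : pvCell dp (a-1) (b-1) with
      | none => rw [hc] at hv; simp at hv
      | some o =>
        cases o with
        | none => rw [hc] at hv; simp at hv
        | some w => rw [hc] at hv; simp at hv; rw [hv]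
    obtain ⟨h1, h2⟩ := pv_memo a b dp v hcell
    rw [h1, h2]
  · rcases hPre with hmemo' | ⟨ha, hb, hlen, hbase, hcells⟩
    · exact absurd hmemo' hmemo
    have hfresh : pvFresh dp a.toNat b.toNat := by
      refine ⟨by omega, ?_, ?_⟩
      · intro i hi
        have := (hcells i hi).1
        omega
      · intro i j hi hj hne
        rcases (hcells i hi).2 j hj with hb0 | hcn
        · exact absurd hb0 hne
        · unfold pvTCell
          rw [hcn]
          rfl
    obtain ⟨v0, hv0⟩ := Option.isSome_iff_exists.mp hbase
    have hv0' : pvTCell dp 0 0 = some v0 := hv0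
    have hrowlen : ∀ i, i < a.toNat → b.toNat ≤ (dp[i]?.getD []).length := hfresh.2.1
    have ea1 : ((a.toNat - 1 : Nat) : Int) = a - 1 := by omega
    have eb1 : ((b.toNat - 1 : Nat) : Int) = b - 1 := by omega
    have hcell' : pvCell dp (a-1) (b-1) = some (pvTCell dp (a.toNat-1) (b.toNat-1)) := by
      have := pvCell_eq_tcell dp (a.toNat-1) (b.toNat-1) (by omega)
        (by have := hrowlen (a.toNat-1) (by omega); omega)
      rwa [ea1, eb1] at this
    by_cases hne : a.toNat - 1 = 0 ∧ b.toNat - 1 = 0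
    · exfalso
      rw [hne.1, hne.2, hv0'] at hcell'
      rw [hcell'] at hmemo
      simp at hmemo
    · have hmiss : pvTCell dp (a.toNat-1) (b.toNat-1) = none :=
        hfresh.2.2 _ _ (by omega) (by omega) hne
      have hAeq : calc_helper a b dp = pvF v0 (a.toNat-1) (b.toNat-1) := by
        have h := pvCalcA_eq dp a.toNat b.toNat v0 hfresh hv0'
          (a.toNat + b.toNat + 1) (a.toNat-1) (b.toNat-1) (by omega) (by omega) (by omega)
        rw [show ((a.toNat - 1 : Nat) : Int) + 1 = a from by omega,
            show ((b.toNat - 1 : Nat) : Int) + 1 = b from by omega] at h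
        unfold calc_helper
        rw [h]
        rfl
      have hBeq : calc_helper_alt a b dp = pvF v0 (a.toNat-1) (b.toNat-1) := by
        unfold calc_helper_alt
        rw [hcell', hmiss]
        simp only []
        rw [show a + 1 = ((a.toNat : Nat) : Int) + 1 from by omega,
            show b + 1 = ((b.toNat : Nat) : Int) + 1 from by omega]
        obtain ⟨hfl, hfr, hfpos, _⟩ :=
          pvOuter dp a.toNat b.toNat v0 hfresh hv0' a.toNat le_rfl
        have hfin := pvCell_eq_tcell
          ((PySem.List.pyRange 1 ((a.toNat : Int) + 1) 1).foldl
            (fun t i => (PySem.List.pyRange 1 ((b.toNat : Int) + 1) 1).foldl (fun t j => pvStep t i j) t) dp)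
          (a.toNat-1) (b.toNat-1) (by rw [hfl]; omega)
          (by rw [hfr]; have := hrowlen (a.toNat-1) (by omega); omega)
        rw [ea1, eb1] at hfin
        rw [hfin]
        rw [hfpos (a.toNat-1) (b.toNat-1) (by omega) (by omega) (by unfold pvProc; omega)]
        rfl
      rw [hAeq, hBeq]
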